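-- pv_equiv track=rewrite | github.com/dusanmitrovic98/highrise-bot | src/utility/ai.py | remove_chars_until_punctuation
-- ===== SOURCE A (Python) =====
-- def remove_chars_until_punctuation(s):
--     end_sentence_punctuation = set('!".).;>?]`|}~*')
--     # Count punctuation marks in the string
--     punctuation_count = sum(1 for char in s if char in end_sentence_punctuation)
--
--     # If there is only one punctuation mark, return the original string
--     if punctuation_count <= 1:
--         return s
--
--     index = len(s) - 1
--     # Iterate backward from the end of the string
--     while index >= 0 and s[index] not in end_sentence_punctuation:
--         index -= 1
--     # Return the substring up to and including the first punctuation mark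
--     return s[:index + 1]
-- ===== SOURCE B (Python) =====
-- def remove_chars_until_punctuation(s):
--     end_sentence_punctuation = set('!".).;>?]`|}~*')
--     positions = [i for i, c in enumerate(s) if c in end_sentence_punctuation]
--     if len(positions) <= 1:
--         return s
--     return s[:positions[-1] + 1]
-- ===== Notes on version B (the rewrite author's own statement) =====
-- stated objective: simpler
-- what changed: B makes one forward pass collecting all punctuation indices, then decides from the table and slices at the last index, replacing A's separate counting pass plus backward scan loop.
import Mathlib
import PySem

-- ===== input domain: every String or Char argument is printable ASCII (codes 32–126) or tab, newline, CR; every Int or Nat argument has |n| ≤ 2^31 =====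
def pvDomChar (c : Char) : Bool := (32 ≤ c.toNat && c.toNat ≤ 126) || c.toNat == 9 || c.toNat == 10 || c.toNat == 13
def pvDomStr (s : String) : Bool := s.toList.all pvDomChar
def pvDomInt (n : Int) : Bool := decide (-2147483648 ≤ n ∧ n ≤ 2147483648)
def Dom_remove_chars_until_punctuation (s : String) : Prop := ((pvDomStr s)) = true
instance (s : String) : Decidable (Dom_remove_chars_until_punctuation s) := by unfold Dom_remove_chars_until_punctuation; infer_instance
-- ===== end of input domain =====

-- B is a simpler decomposition: one forward pass collects all punctuation indices, then slices at the last one.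

-- ===== PORT A =====
-- set('!".).;>?]`|}~*')
def pvPunct : PySem.Set Char := PySem.Set.ofList ("!\".).;>?]`|}~*".toList)

-- while index >= 0 and s[index] not in end_sentence_punctuation: index -= 1
def pvALoop (cs : List Char) (index : Int) : Int :=
  if h : 0 ≤ index then
    if PySem.Set.contains pvPunct (PySem.List.pyGetD cs index ' ') then index
    else pvALoop cs (index - 1)
  else index
termination_by (index + 1).toNat
decreasing_by omega

def remove_chars_until_punctuation (s : String) : String :=
  let cs := s.toList
  let punctuation_count := (cs.map (fun c => if PySem.Set.contains pvPunct c then (1 : Int) else 0)).sum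
  if punctuation_count ≤ 1 then s
  else
    let index := pvALoop cs ((cs.length : Int) - 1)
    String.mk (PySem.List.slice cs none (some (index + 1)))

-- ===== PORT B =====
def remove_chars_until_punctuation_alt (s : String) : String :=
  let cs := s.toList
  let positions := (PySem.List.enumerate cs).filterMap
    (fun p => if PySem.Set.contains pvPunct p.2 then some p.1 else none)
  if positions.length ≤ 1 then s
  else String.mk (PySem.List.slice cs none (some (PySem.List.pyGetD positions (-1) 0 + 1)))

-- ===== PRECONDITION & SPEC =====
def Spec_remove_chars_until_punctuation (s : String) (out : String) : Prop := out = remove_chars_until_punctuation_alt s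
instance (s : String) (out : String) : Decidable (Spec_remove_chars_until_punctuation s out) := by unfold Spec_remove_chars_until_punctuation; infer_instance

-- ===== CLAIM (what is proved, stated in full; the proofs are below) =====
def Claim_equal_remove_chars_until_punctuation : Prop := ∀ (s : String), Dom_remove_chars_until_punctuation s → Spec_remove_chars_until_punctuation s (remove_chars_until_punctuation s)

-- ===== LEMMAS AND PROOFS =====

-- B's position list, as a function of the char list and the enumerate start offset
def pvPos (cs : List Char) (k : Int) : List Int :=
  (PySem.List.enumerate cs k).filterMap
    (fun p => if PySem.Set.contains pvPunct p.2 then some p.1 else none)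

theorem pvPos_nil (k : Int) : pvPos [] k = [] := rfl

theorem pvPos_cons (c : Char) (cs : List Char) (k : Int) :
    pvPos (c :: cs) k = (if PySem.Set.contains pvPunct c then [k] else []) ++ pvPos cs (k + 1) := by
  unfold pvPos
  rw [PySem.List.enumerate_cons, List.filterMap_cons]
  by_cases hp : c ∈ pvPunct <;> simp [hp]

theorem pvPos_length (cs : List Char) (k : Int) :
    (pvPos cs k).length = cs.countP (fun c => decide (c ∈ pvPunct)) := by
  induction cs generalizing k with
  | nil => rfl
  | cons c cs ih =>
    rw [pvPos_cons, List.countP_cons]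
    by_cases hp : c ∈ pvPunct <;> simp [hp, ih]

theorem pvPos_append (cs ds : List Char) (k : Int) :
    pvPos (cs ++ ds) k = pvPos cs k ++ pvPos ds (k + cs.length) := by
  induction cs generalizing k with
  | nil => simp [pvPos_nil]
  | cons c cs ih =>
    simp only [List.cons_append, pvPos_cons, ih, List.append_assoc, List.length_cons]
    congr 2
    push_cast
    ring_nf

theorem pvCount_eq (cs : List Char) :
    (cs.map (fun c => if PySem.Set.contains pvPunct c then (1 : Int) else 0)).sum
      = (cs.countP (fun c => decide (c ∈ pvPunct)) : Int) := by
  induction cs with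
  | nil => rfl
  | cons c cs ih =>
    rw [List.map_cons, List.sum_cons, ih, List.countP_cons]
    by_cases hp : c ∈ pvPunct <;> simp [hp] <;> omega

-- A's backward scan ignores list elements beyond the scanned index
theorem pvALoop_append (cs : List Char) (c : Char) (i : Int) (h : i < cs.length) :
    pvALoop (cs ++ [c]) i = pvALoop cs i := by
  by_cases h0 : 0 ≤ i
  · rw [pvALoop]
    conv_rhs => rw [pvALoop]
    have hget : PySem.List.pyGetD (cs ++ [c]) i ' ' = PySem.List.pyGetD cs i ' ' := by
      rw [PySem.List.pyGetD_eq_getElem _ ' ' h0 (by simp; omega),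
          PySem.List.pyGetD_eq_getElem _ ' ' h0 (by omega)]
      rw [List.getElem_append_left (by omega)]
    rw [hget]
    simp only [dif_pos h0]
    split
    · rfl
    · exact pvALoop_append cs c (i - 1) (by omega)
  · rw [pvALoop]
    conv_rhs => rw [pvALoop]
    simp [h0]
termination_by (i + 1).toNat
decreasing_by omega

-- On a nonempty position list, A's backward scan from the end finds the last position
theorem pvALoop_eq_last (cs : List Char) (h : pvPos cs 0 ≠ []) :
    pvALoop cs ((cs.length : Int) - 1) = (pvPos cs 0).getLast h := by
  induction cs using List.reverseRecOn with
  | nil => simp [pvPos_nil] at h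
  | append_singleton cs c ih =>
    have hlen : ((cs ++ [c]).length : Int) - 1 = (cs.length : Int) := by simp
    rw [hlen]
    have hpos := pvPos_append cs [c] 0
    simp only [Int.zero_add] at hpos
    have hget : PySem.List.pyGetD (cs ++ [c]) (cs.length : Int) ' ' = c := by
      rw [PySem.List.pyGetD_eq_getElem _ ' ' (by omega) (by simp)]
      simp
    by_cases hp : c ∈ pvPunct
    · -- last char is punctuation: the scan stops immediately at index len cs
      rw [pvALoop, hget]
      have hlast : pvPos (cs ++ [c]) 0 = pvPos cs 0 ++ [(cs.length : Int)] := by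
        rw [hpos, pvPos_cons, pvPos_nil]
        simp [hp]
      simp [hp, hlast]
    · -- last char is not punctuation: positions unchanged, scan steps past it
      have hone : pvPos (cs ++ [c]) 0 = pvPos cs 0 := by
        rw [hpos, pvPos_cons, pvPos_nil]
        simp [hp]
      have hne : pvPos cs 0 ≠ [] := by rw [hone] at h; exact h
      rw [pvALoop, hget]
      simp only [dif_pos (by omega : (0:Int) ≤ (cs.length : Int))]
      rw [if_neg (by simp [hp])]
      have hcs : cs ≠ [] := by intro h0; subst h0; simp [pvPos_nil] at hne
      rw [pvALoop_append cs c _ (by have := List.length_pos_iff.mpr hcs; omega)]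
      rw [ih hne]
      exact List.getLast_congr _ _ hone.symm

-- ===== VERDICT (by name: the statement is the Claim_ definition above) =====
theorem remove_chars_until_punctuation_spec : Claim_equal_remove_chars_until_punctuation := by
  intro s _
  unfold Spec_remove_chars_until_punctuation remove_chars_until_punctuation remove_chars_until_punctuation_alt
  set cs := s.toList with hcs
  have hcnt := pvCount_eq cs
  have hlen := pvPos_length cs 0
  show (if (cs.map (fun c => if PySem.Set.contains pvPunct c then (1 : Int) else 0)).sum ≤ 1 then s
      else String.mk (PySem.List.slice cs none (some (pvALoop cs ((cs.length : Int) - 1) + 1)))) =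
    (if (pvPos cs 0).length ≤ 1 then s
      else String.mk (PySem.List.slice cs none (some (PySem.List.pyGetD (pvPos cs 0) (-1) 0 + 1))))
  rw [hcnt]
  by_cases hle : (pvPos cs 0).length ≤ 1
  · have h1 : ((cs.countP (fun c => decide (c ∈ pvPunct)) : Int)) ≤ 1 := by
      rw [← hlen]; exact_mod_cast hle
    rw [if_pos h1, if_pos hle]
  · have h1 : ¬ ((cs.countP (fun c => decide (c ∈ pvPunct)) : Int) ≤ 1) := by
      rw [← hlen]; exact_mod_cast hle
    rw [if_neg h1, if_neg hle]
    have hne : pvPos cs 0 ≠ [] := by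
      intro h0; rw [h0] at hle; simp at hle
    rw [PySem.List.pyGetD_neg_one _ _ hne, pvALoop_eq_last cs hne]
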